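-- pv_equiv track=rewrite | github.com/LiuJiang20/douDiZhuAI | utility.py | getTrioSolos
-- ===== SOURCE A (Python) =====
-- from typing import List, Tuple
--
-- def getSolos(hand: List[int], lastPlay=None):
--     if lastPlay:
--         return [(i,) for i in hand if i > lastPlay[0]]
--     return [(i,) for i in hand]
--
-- def getTrios(hand: List[int], lastPlay=None):
--     trios = set()
--     handSize = len(hand)
--     pos = 2
--     while pos < handSize:
--         if hand[pos] == hand[pos - 1] and hand[pos] == hand[pos - 2] and (not lastPlay or hand[pos] > lastPlay[0]):
--             trios.add((hand[pos],) * 3)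
--         pos += 1
--     return sorted(list(trios))
--
-- def getTrioSolos(hand: List[int], lastPlay=None):
--     trioSolo = []
--     if lastPlay:
--         trios = getTrios(hand, lastPlay[:3])
--     else:
--         trios = getTrios(hand)
--     for trio in trios:
--         for solo in sorted(set(getSolos(removeFromHand(hand, trio)))):
--             if solo[0] != trio[0]:
--                 trioSolo.append(trio + solo)
--     return trioSolo
--
-- def removeFromHand(hand: List[int], cards):
--     left = hand.copy()
--     for i in cards:
--         left.remove(i)
--     return left
-- ===== SOURCE B (Python) =====
-- def getTrioSolos(hand, lastPlay=None):
--     # one pass over adjacent triples, then pair each trio with the sorted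
--     # distinct values of the hand computed once (skipping the trio's own value)
--     th = lastPlay[0] if lastPlay else None
--     trioVals = sorted({c for a, b, c in zip(hand, hand[1:], hand[2:])
--                        if a == b == c and (th is None or c > th)})
--     vals = sorted(set(hand))
--     return [(v, v, v, u) for v in trioVals for u in vals if u != v]
-- ===== Notes on version B (the rewrite author's own statement) =====
-- stated objective: faster
-- what changed: B scans adjacent triples once via zip and pairs each trio value with the hand's sorted distinct values computed once, instead of A's per-trio copy/remove/set/sort of the remaining hand.
import Mathlib
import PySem

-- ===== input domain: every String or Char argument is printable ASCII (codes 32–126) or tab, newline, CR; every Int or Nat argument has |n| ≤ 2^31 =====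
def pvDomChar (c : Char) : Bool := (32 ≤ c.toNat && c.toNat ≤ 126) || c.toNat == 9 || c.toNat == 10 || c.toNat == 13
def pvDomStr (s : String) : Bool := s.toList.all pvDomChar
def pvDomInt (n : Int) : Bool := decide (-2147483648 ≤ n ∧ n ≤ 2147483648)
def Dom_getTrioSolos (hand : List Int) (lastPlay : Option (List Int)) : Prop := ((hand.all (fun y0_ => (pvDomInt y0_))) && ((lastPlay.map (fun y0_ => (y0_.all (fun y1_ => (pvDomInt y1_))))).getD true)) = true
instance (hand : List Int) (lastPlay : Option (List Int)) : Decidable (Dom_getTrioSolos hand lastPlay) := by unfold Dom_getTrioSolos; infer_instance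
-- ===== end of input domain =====

-- B replaces A's per-trio copy/remove/set/sort of the remaining hand by one zip-scan for
-- trios plus the hand's sorted distinct values computed once (objective: faster, asymptotic).


-- ===== PORT A =====
-- Tuple convention: the 1-tuples (i,) of getSolos are modelled by the Int i, and the
-- 3-tuples (v,v,v) of getTrios by their value v (sorting all-equal triples / 1-tuples
-- lexicographically is sorting their values); getTrioSolos's 4-tuples become [v,v,v,u].
def pyGetSolos (hand : List Int) (lastPlay : Option (List Int)) : List Int :=
  match lastPlay with
  | some (l0 :: _) => hand.filter (fun i => decide (l0 < i))   -- `if lastPlay:` is true only on a nonempty list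
  | _ => hand

def pyGetTrios (hand : List Int) (lastPlay : Option (List Int)) : List Int :=
  let handSize : Int := hand.length
  -- hand[pos] is indexed three times, as in the Python; indices are always in range (2 ≤ pos < len(hand))
  let trios := (PySem.List.pyRange 2 handSize).foldl (fun s pos =>
      if PySem.List.pyGetD hand pos 0 == PySem.List.pyGetD hand (pos - 1) 0 &&
         PySem.List.pyGetD hand pos 0 == PySem.List.pyGetD hand (pos - 2) 0 &&
         (match lastPlay with
          | some (l0 :: _) => decide (l0 < PySem.List.pyGetD hand pos 0)
          | _ => true) then s.add (PySem.List.pyGetD hand pos 0) else s) (PySem.Set.ofList [])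
  PySem.List.sorted trios (fun x => x)

def pyRemoveFromHand (hand : List Int) (cards : List Int) : List Int :=
  -- list.remove(i) removes the first occurrence (= List.erase); it raises ValueError when
  -- absent, which is unreachable from getTrioSolos (the trio guarantees three copies),
  -- so the .getD fallback is never taken there.
  cards.foldl (fun left i => (PySem.List.remove? left i).getD left) hand

def getTrioSolos (hand : List Int) (lastPlay : Option (List Int)) : List (List Int) :=
  let trios :=
    match lastPlay with
    | some (l0 :: rest) => pyGetTrios hand (some (PySem.List.slice (l0 :: rest) none (some 3)))  -- lastPlay[:3]
    | _ => pyGetTrios hand none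
  trios.foldl (fun acc v =>
    (PySem.List.sorted (PySem.Set.ofList (pyGetSolos (pyRemoveFromHand hand [v, v, v]) none)) (fun x => x)).foldl
      (fun acc solo => if solo != v then acc ++ [[v, v, v, solo]] else acc) acc) []

-- ===== PORT B =====
def getTrioSolos_alt (hand : List Int) (lastPlay : Option (List Int)) : List (List Int) :=
  let th : Option Int := match lastPlay with | some (l0 :: _) => some l0 | _ => none
  -- {c for a,b,c in zip(hand, hand[1:], hand[2:]) if a==b==c and (th is None or c>th)}
  let trioVals := PySem.List.sorted (PySem.Set.ofList
      (((hand.zip (hand.drop 1)).zip (hand.drop 2)).filterMap (fun p =>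
        if p.1.1 == p.1.2 && p.1.2 == p.2 &&
           (match th with | none => true | some t => decide (t < p.2)) then some p.2 else none)))
    (fun x => x)
  let vals := PySem.List.sorted (PySem.Set.ofList hand) (fun x => x)
  trioVals.flatMap (fun v => (vals.filter (fun u => u != v)).map (fun u => [v, v, v, u]))

-- ===== PRECONDITION & SPEC =====
def Spec_getTrioSolos (hand : List Int) (lastPlay : Option (List Int)) (out : List (List Int)) : Prop := out = getTrioSolos_alt hand lastPlay
instance (hand : List Int) (lastPlay : Option (List Int)) (out : List (List Int)) : Decidable (Spec_getTrioSolos hand lastPlay out) := by unfold Spec_getTrioSolos; infer_instance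

-- ===== CLAIM (what is proved, stated in full; the proofs are below) =====
def Claim_equal_getTrioSolos : Prop := ∀ (hand : List Int) (lastPlay : Option (List Int)), Dom_getTrioSolos hand lastPlay → Spec_getTrioSolos hand lastPlay (getTrioSolos hand lastPlay)

-- ===== LEMMAS AND PROOFS =====

-- two strictly increasing integer lists with the same members are equal
theorem pv_eq_of_pairwise_lt_of_mem_iff (l1 l2 : List Int)
    (h1 : l1.Pairwise (· < ·)) (h2 : l2.Pairwise (· < ·))
    (hm : ∀ a, a ∈ l1 ↔ a ∈ l2) : l1 = l2 := by
  have n1 : l1.Nodup := h1.imp (fun h => ne_of_lt h)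
  have n2 : l2.Nodup := h2.imp (fun h => ne_of_lt h)
  exact List.Perm.eq_of_pairwise
    (fun a b _ _ hab hba => absurd hba (not_lt_of_gt hab)) h1 h2
    ((List.perm_ext_iff_of_nodup n1 n2).2 hm)

-- sorted-without-key of a duplicate-free list is strictly increasing
theorem pv_sorted_pairwise_lt (xs : List Int) (h : xs.Nodup) :
    (PySem.List.sorted xs (fun x => x)).Pairwise (· < ·) := by
  have hle := PySem.List.sorted_pairwise xs (fun x => x)
  have hnd : (PySem.List.sorted xs (fun x => x)).Nodup :=
    ((PySem.List.sorted_perm xs (fun x => x) false).nodup_iff).2 h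
  exact (hle.and hnd).imp (fun h => lt_of_le_of_ne h.1 h.2)

-- membership in A's set-building fold
theorem pv_mem_foldl_add_if {α : Type} [BEq α] [LawfulBEq α]
    (p : Int → Bool) (f : Int → α) (xs : List Int) (s0 : PySem.Set α) (y : α) :
    (y ∈ xs.foldl (fun s pos => if p pos then PySem.Set.add s (f pos) else s) s0) ↔
      (y ∈ s0 ∨ ∃ pos, pos ∈ xs ∧ (p pos = true ∧ y = f pos)) := by
  induction xs generalizing s0 with
  | nil => simp
  | cons x t ih =>
    simp only [List.foldl_cons, ih]
    by_cases hx : p x = true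
    · simp only [hx, if_true, PySem.Set.mem_add, List.mem_cons]
      constructor
      · rintro (⟨hy | rfl⟩ | h)
        · exact Or.inl hy
        · exact Or.inr ⟨x, Or.inl rfl, hx, rfl⟩
        · rcases h with ⟨pos, hm, hp, hy⟩
          exact Or.inr ⟨pos, Or.inr hm, hp, hy⟩
      · rintro (hy | ⟨pos, (rfl | hm), hp, hy⟩)
        · exact Or.inl (Or.inl hy)
        · exact Or.inl (Or.inr hy)
        · exact Or.inr ⟨pos, hm, hp, hy⟩
    · simp only [hx, List.mem_cons]
      constructor
      · rintro (hy | ⟨pos, hm, hp, hy⟩)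
        · exact Or.inl hy
        · exact Or.inr ⟨pos, Or.inr hm, hp, hy⟩
      · rintro (hy | ⟨pos, (rfl | hm), hp, hy⟩)
        · exact Or.inl hy
        · exact absurd hp hx
        · exact Or.inr ⟨pos, hm, hp, hy⟩

theorem pv_nodup_foldl_add_if {α : Type} [BEq α] [LawfulBEq α]
    (p : Int → Bool) (f : Int → α) (xs : List Int) (s0 : PySem.Set α)
    (h0 : List.Nodup s0) :
    List.Nodup (xs.foldl (fun s pos => if p pos then PySem.Set.add s (f pos) else s) s0) := by
  induction xs generalizing s0 with
  | nil => exact h0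
  | cons x t ih =>
    simp only [List.foldl_cons]
    by_cases hx : p x = true
    · simp only [hx, if_true]
      exact ih _ (PySem.Set.nodup_add _ _ h0)
    · simp only [hx, Bool.false_eq_true, if_false]
      exact ih _ h0

-- list.remove(v) (when it does not raise) keeps membership of every u ≠ v
theorem pv_mem_removeGetD (l : List Int) (v u : Int) (hne : u ≠ v) :
    u ∈ (PySem.List.remove? l v).getD l ↔ u ∈ l := by
  cases h : List.idxOf? v l with
  | none => simp [PySem.List.remove?, h]
  | some k =>
    obtain ⟨hk, hlk, -⟩ := List.idxOf?_eq_some_iff.1 h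
    simp only [PySem.List.remove?, h, Option.map_some, Option.getD_some]
    rw [List.eraseIdx_eq_take_drop_succ]
    constructor
    · intro hu
      rcases List.mem_append.1 hu with h1 | h1
      · exact (List.take_sublist _ _).mem h1
      · exact (List.drop_sublist _ _).mem h1
    · intro hu
      obtain ⟨j, hj, rfl⟩ := List.mem_iff_getElem.1 hu
      have hjk : j ≠ k := by
        intro e; subst e; exact hne hlk
      refine List.mem_append.2 ?_
      rcases Nat.lt_or_ge j k with hlt | hge
      · left
        have hjt : j < (l.take k).length := by simp [List.length_take]; omega
        have he : (l.take k)[j]'hjt = l[j] := List.getElem_take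
        exact he ▸ List.getElem_mem hjt
      · right
        have hjd : j - (k + 1) < (l.drop (k + 1)).length := by simp [List.length_drop]; omega
        have he : (l.drop (k + 1))[j - (k + 1)]'hjd = l[j] := by
          rw [List.getElem_drop]
          congr 1
          omega
        exact he ▸ List.getElem_mem hjd

theorem pv_mem_erase3 (hand : List Int) (v u : Int) (hne : u ≠ v) :
    u ∈ pyRemoveFromHand hand [v, v, v] ↔ u ∈ hand := by
  simp only [pyRemoveFromHand, List.foldl_cons, List.foldl_nil]
  rw [pv_mem_removeGetD _ _ _ hne, pv_mem_removeGetD _ _ _ hne, pv_mem_removeGetD _ _ _ hne]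

-- the per-trio solo list of A agrees, outside the trio's value, with B's global value list
theorem pv_solos_eq (hand : List Int) (v : Int) :
    (PySem.List.sorted (PySem.Set.ofList (pyGetSolos (pyRemoveFromHand hand [v, v, v]) none)) (fun x => x)).filter
        (fun u => u != v)
      = (PySem.List.sorted (PySem.Set.ofList hand) (fun x => x)).filter (fun u => u != v) := by
  apply pv_eq_of_pairwise_lt_of_mem_iff
  · exact (PySem.List.sorted_ofList_pairwise_lt _).filter _
  · exact (PySem.List.sorted_ofList_pairwise_lt _).filter _
  · intro a
    simp only [List.mem_filter, PySem.List.mem_sorted, PySem.Set.mem_ofList, bne_iff_ne,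
      ne_eq, decide_eq_true_eq, pyGetSolos]
    constructor
    · rintro ⟨ha, hne⟩
      exact ⟨(pv_mem_erase3 hand v a hne).1 ha, hne⟩
    · rintro ⟨ha, hne⟩
      exact ⟨(pv_mem_erase3 hand v a hne).2 ha, hne⟩

-- adjacent triples of the hand: by position vs by zipping
theorem pv_mem_zip3 (hand : List Int) (p : (Int × Int) × Int) :
    p ∈ (hand.zip (hand.drop 1)).zip (hand.drop 2) ↔
      ∃ i : Nat, ∃ h : i + 2 < hand.length,
        p = ((hand[i]'(by omega), hand[i+1]'(by omega)), hand[i+2]'h) := by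
  rw [List.mem_iff_getElem]
  constructor
  · rintro ⟨i, hi, rfl⟩
    have hlen : i + 2 < hand.length := by
      simp only [List.length_zip, List.length_drop] at hi; omega
    refine ⟨i, hlen, ?_⟩
    simp only [List.getElem_zip, List.getElem_drop, show 1 + i = i + 1 from by omega,
      show 2 + i = i + 2 from by omega]
  · rintro ⟨i, hlen, rfl⟩
    have hi : i < ((hand.zip (hand.drop 1)).zip (hand.drop 2)).length := by
      simp only [List.length_zip, List.length_drop]; omega
    refine ⟨i, hi, ?_⟩
    simp only [List.getElem_zip, List.getElem_drop, show 1 + i = i + 1 from by omega,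
      show 2 + i = i + 2 from by omega]

-- the index scan and the zip scan see the same triples
theorem pv_scan_iff (hand : List Int) (cA cB : Int → Int → Int → Bool)
    (hc : ∀ a b c, (cA a b c = true ↔ cB a b c = true)) (y : Int) :
    (∃ pos, pos ∈ PySem.List.pyRange 2 (hand.length : Int) ∧
        (cA (PySem.List.pyGetD hand (pos - 2) 0) (PySem.List.pyGetD hand (pos - 1) 0)
            (PySem.List.pyGetD hand pos 0) = true
         ∧ y = PySem.List.pyGetD hand pos 0))
    ↔ (∃ p, p ∈ (hand.zip (hand.drop 1)).zip (hand.drop 2) ∧ (cB p.1.1 p.1.2 p.2 = true ∧ y = p.2)) := by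
  constructor
  · rintro ⟨pos, hpos, hP, rfl⟩
    obtain ⟨h2, hlt⟩ := PySem.List.mem_pyRange_one.1 hpos
    have hlen : pos.toNat - 2 + 2 < hand.length := by omega
    set i := pos.toNat - 2 with hi
    have e0 : PySem.List.pyGetD hand pos 0 = hand[i + 2]'hlen := by
      rw [PySem.List.pyGetD_eq_getElem hand 0 (by omega) (by omega)]
      congr 1 <;> omega
    have e1 : PySem.List.pyGetD hand (pos - 1) 0 = hand[i + 1]'(by omega) := by
      rw [PySem.List.pyGetD_eq_getElem hand 0 (by omega) (by omega)]
      congr 1 <;> omega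
    have e2 : PySem.List.pyGetD hand (pos - 2) 0 = hand[i]'(by omega) := by
      rw [PySem.List.pyGetD_eq_getElem hand 0 (by omega) (by omega)]
      congr 1 <;> omega
    refine ⟨((hand[i]'(by omega), hand[i+1]'(by omega)), hand[i+2]'hlen),
      (pv_mem_zip3 hand _).2 ⟨i, hlen, rfl⟩, ?_, e0⟩
    rw [e0, e1, e2] at hP
    exact (hc _ _ _).1 hP
  · rintro ⟨p, hp, hP, rfl⟩
    obtain ⟨i, hlen, rfl⟩ := (pv_mem_zip3 hand p).1 hp
    have e0 : PySem.List.pyGetD hand ((i : Int) + 2) 0 = hand[i + 2]'hlen := by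
      rw [PySem.List.pyGetD_eq_getElem hand 0 (by omega) (by push_cast; omega)]
      congr 1 <;> omega
    have e1 : PySem.List.pyGetD hand ((i : Int) + 2 - 1) 0 = hand[i + 1]'(by omega) := by
      rw [PySem.List.pyGetD_eq_getElem hand 0 (by omega) (by push_cast; omega)]
      congr 1 <;> omega
    have e2 : PySem.List.pyGetD hand ((i : Int) + 2 - 2) 0 = hand[i]'(by omega) := by
      rw [PySem.List.pyGetD_eq_getElem hand 0 (by omega) (by push_cast; omega)]
      congr 1 <;> omega
    refine ⟨(i : Int) + 2, PySem.List.mem_pyRange_one.2 ⟨by omega, by omega⟩, ?_, e0.symm⟩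
    rw [e0, e1, e2]
    exact (hc _ _ _).2 hP

-- A's getTrios set-scan equals B's zip-scan, for an arbitrary threshold test m
theorem pv_trios_gen (hand : List Int) (m : Int → Bool) :
    PySem.List.sorted ((PySem.List.pyRange 2 (hand.length : Int)).foldl (fun s pos =>
        if PySem.List.pyGetD hand pos 0 == PySem.List.pyGetD hand (pos - 1) 0 &&
           PySem.List.pyGetD hand pos 0 == PySem.List.pyGetD hand (pos - 2) 0 &&
           m (PySem.List.pyGetD hand pos 0) then PySem.Set.add s (PySem.List.pyGetD hand pos 0) else s)
      (PySem.Set.ofList [])) (fun x => x)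
    = PySem.List.sorted (PySem.Set.ofList (((hand.zip (hand.drop 1)).zip (hand.drop 2)).filterMap
        (fun p => if p.1.1 == p.1.2 && p.1.2 == p.2 && m p.2 then some p.2 else none))) (fun x => x) := by
  apply pv_eq_of_pairwise_lt_of_mem_iff
  · exact pv_sorted_pairwise_lt _ (pv_nodup_foldl_add_if _ _ _ _ (by simp [PySem.Set.ofList]))
  · exact PySem.List.sorted_ofList_pairwise_lt _
  · intro y
    rw [PySem.List.mem_sorted, PySem.List.mem_sorted, PySem.Set.mem_ofList,
      pv_mem_foldl_add_if
        (fun pos => PySem.List.pyGetD hand pos 0 == PySem.List.pyGetD hand (pos - 1) 0 &&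
          PySem.List.pyGetD hand pos 0 == PySem.List.pyGetD hand (pos - 2) 0 &&
          m (PySem.List.pyGetD hand pos 0))
        (fun pos => PySem.List.pyGetD hand pos 0),
      List.mem_filterMap]
    have hempty : (y ∈ PySem.Set.ofList ([] : List Int)) ↔ False := by
      simp [PySem.Set.ofList]
    rw [hempty, false_or]
    rw [pv_scan_iff hand
      (fun a b c => c == b && c == a && m c)
      (fun a b c => a == b && b == c && m c)
      (by
        intro a b c
        simp only [Bool.and_eq_true, beq_iff_eq]
        constructor
        · rintro ⟨⟨h1, h2⟩, h3⟩
          exact ⟨⟨by omega, by omega⟩, h3⟩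
        · rintro ⟨⟨h1, h2⟩, h3⟩
          exact ⟨⟨by omega, by omega⟩, h3⟩) y]
    constructor
    · rintro ⟨p, hp, hP, hy⟩
      refine ⟨p, hp, ?_⟩
      rw [if_pos hP, hy]
    · rintro ⟨p, hp, hif⟩
      split at hif
      next hP => exact ⟨p, hp, hP, (Option.some_inj.1 hif).symm⟩
      next => simp at hif

-- ===== VERDICT (by name: the statement is the Claim_ definition above) =====
theorem getTrioSolos_spec : Claim_equal_getTrioSolos := by
  intro hand lastPlay _
  unfold Spec_getTrioSolos getTrioSolos getTrioSolos_alt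
  simp only [PySem.List.foldl_append_if, PySem.List.foldl_append_eq_flatMap, List.nil_append,
    pv_solos_eq]
  cases lastPlay with
  | none =>
    dsimp only
    have htrios : pyGetTrios hand none
        = PySem.List.sorted (PySem.Set.ofList (((hand.zip (hand.drop 1)).zip (hand.drop 2)).filterMap
            (fun p => if p.1.1 == p.1.2 && p.1.2 == p.2 && true then some p.2 else none))) (fun x => x) :=
      pv_trios_gen hand (fun _ => true)
    rw [htrios]
  | some l =>
    cases l with
    | nil =>
      dsimp only
      have htrios : pyGetTrios hand none
          = PySem.List.sorted (PySem.Set.ofList (((hand.zip (hand.drop 1)).zip (hand.drop 2)).filterMap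
              (fun p => if p.1.1 == p.1.2 && p.1.2 == p.2 && true then some p.2 else none))) (fun x => x) :=
        pv_trios_gen hand (fun _ => true)
      rw [htrios]
    | cons l0 rest =>
      dsimp only
      rw [PySem.List.slice_to _ (by norm_num), show ((3 : Int)).toNat = 3 from rfl,
        List.take_succ_cons]
      have htrios : pyGetTrios hand (some (l0 :: List.take 2 rest))
          = PySem.List.sorted (PySem.Set.ofList (((hand.zip (hand.drop 1)).zip (hand.drop 2)).filterMap
              (fun p => if p.1.1 == p.1.2 && p.1.2 == p.2 && decide (l0 < p.2) then some p.2 else none))) (fun x => x) :=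
        pv_trios_gen hand (fun c => decide (l0 < c))
      rw [htrios]
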